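-- pv_equiv track=rewrite | github.com/Leibniz-IWT/ddgclib | ddgclib/geometry/periodic.py | _shift_directions
-- ===== SOURCE A (Python) =====
-- from itertools import product
--
-- def _shift_directions(periodic_axes: list[int], dim: int) -> list[tuple[int, ...]]:
--     """Generate all non-zero shift direction tuples for periodic axes.
--
--     For N periodic axes, returns 3^N - 1 directions (excludes the zero shift).
--     Each direction is a dim-length tuple with values in {-1, 0, +1} at periodic
--     axes and 0 elsewhere.
--     """
--     # Build shift components for periodic axes only
--     per_ax_options = {ax: [-1, 0, 1] for ax in periodic_axes}
--
--     directions: list[tuple[int, ...]] = []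
--     for combo in product(*[per_ax_options[ax] for ax in periodic_axes]):
--         if all(c == 0 for c in combo):
--             continue  # skip zero shift
--         d = [0] * dim
--         for ax, c in zip(periodic_axes, combo):
--             d[ax] = c
--         directions.append(tuple(d))
--     return directions
-- ===== SOURCE B (Python) =====
-- def _shift_directions(periodic_axes: list[int], dim: int) -> list[tuple[int, ...]]:
--     """Generate all non-zero shift direction tuples for periodic axes.
--
--     Recursive depth-first generation: walk the axes, branching on -1/0/+1
--     for each, carrying the partially-filled direction vector and a flag
--     saying whether any non-zero component was chosen so far; a leaf emits
--     its vector only if the flag is set, so the single zero shift is pruned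
--     without scanning any combination.
--     """
--     def rec(axes: list[int], d: list[int], nonzero: bool) -> list[tuple[int, ...]]:
--         if not axes:
--             return [tuple(d)] if nonzero else []
--         ax, rest = axes[0], axes[1:]
--         out: list[tuple[int, ...]] = []
--         for c in (-1, 0, 1):
--             nd = d.copy()
--             nd[ax] = c
--             out.extend(rec(rest, nd, nonzero or c != 0))
--         return out
--     return rec(periodic_axes, [0] * dim, False)
-- ===== Notes on version B (the rewrite author's own statement) =====
-- stated objective: alternative
-- what changed: Replaces itertools.product over option lists plus an all(c==0) scan of every combination and a zip fill pass by a recursive depth-first generator that builds each direction vector directly while descending the axes, carrying a nonzero flag so the single zero shift is pruned at its leaf without any combination scan.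
import Mathlib
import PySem

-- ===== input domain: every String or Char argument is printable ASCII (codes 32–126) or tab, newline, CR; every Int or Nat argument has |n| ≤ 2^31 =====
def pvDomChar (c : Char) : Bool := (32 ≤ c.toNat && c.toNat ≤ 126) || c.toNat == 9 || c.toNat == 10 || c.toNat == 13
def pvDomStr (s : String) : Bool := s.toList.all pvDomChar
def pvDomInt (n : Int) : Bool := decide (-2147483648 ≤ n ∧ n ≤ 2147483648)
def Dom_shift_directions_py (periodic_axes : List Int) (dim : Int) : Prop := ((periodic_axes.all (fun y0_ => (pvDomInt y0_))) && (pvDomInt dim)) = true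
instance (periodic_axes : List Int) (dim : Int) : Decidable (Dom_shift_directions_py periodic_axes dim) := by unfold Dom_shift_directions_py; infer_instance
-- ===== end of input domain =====

-- B replaces product + all(c==0) filtering by a recursive depth-first generator
-- carrying a nonzero flag (objective: alternative algorithm; return value only).


-- ===== PORT A =====
-- itertools.product over a list of pools (first pool varies slowest)
def pvProd (pools : List (List Int)) : List (List Int) :=
  match pools with
  | [] => [[]]
  | p :: ps => p.flatMap (fun x => (pvProd ps).map (fun r => x :: r))

def shift_directions_py (periodic_axes : List Int) (dim : Int) : List (List Int) :=
  let per_ax_options : PySem.Dict Int (List Int) :=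
    periodic_axes.foldl (fun d ax => d.insert ax [-1, 0, 1]) PySem.Dict.empty
  let combos := pvProd (periodic_axes.map (fun ax => per_ax_options.getD ax []))
  combos.foldl (fun directions combo =>
    if combo.all (fun c => c == 0) then directions
    else
      let d := (periodic_axes.zip combo).foldl
        (fun d p => PySem.List.pySetD d p.1 p.2)
        (List.replicate dim.toNat 0)
      directions ++ [d]) []

-- ===== PORT B =====
-- recursive DFS over the axes: branch on -1/0/1, carry the partially filled
-- vector d and a flag recording whether any nonzero component was chosen
def pvRecB (axes : List Int) (d : List Int) (nonzero : Bool) : List (List Int) :=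
  match axes with
  | [] => if nonzero then [d] else []
  | ax :: rest =>
    ([-1, 0, 1] : List Int).foldl
      (fun out c => out ++ pvRecB rest (PySem.List.pySetD d ax c) (nonzero || c != 0)) []

def shift_directions_py_alt (periodic_axes : List Int) (dim : Int) : List (List Int) :=
  pvRecB periodic_axes (List.replicate dim.toNat 0) false

-- ===== PRECONDITION & SPEC =====
-- A raises IndexError on d[ax] = c when some axis is outside the valid Python index
-- range of the dim-length list; Pre_ admits exactly the inputs where every axis is valid.
def Pre_shift_directions_py (periodic_axes : List Int) (dim : Int) : Prop :=
  ∀ ax ∈ periodic_axes, -dim ≤ ax ∧ ax < dim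

instance (periodic_axes : List Int) (dim : Int) : Decidable (Pre_shift_directions_py periodic_axes dim) := by
  unfold Pre_shift_directions_py; infer_instance

def pvWitness_shift_directions_py : List Int × Int := ([0, 1], 2)

def Spec_shift_directions_py (periodic_axes : List Int) (dim : Int) (out : List (List Int)) : Prop := out = shift_directions_py_alt periodic_axes dim
instance (periodic_axes : List Int) (dim : Int) (out : List (List Int)) : Decidable (Spec_shift_directions_py periodic_axes dim out) := by unfold Spec_shift_directions_py; infer_instance

-- ===== CLAIM (what is proved, stated in full; the proofs are below) =====
def Claim_equal_shift_directions_py : Prop := ∀ (periodic_axes : List Int) (dim : Int), Dom_shift_directions_py periodic_axes dim → Pre_shift_directions_py periodic_axes dim → Spec_shift_directions_py periodic_axes dim (shift_directions_py periodic_axes dim)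

-- ===== LEMMAS AND PROOFS =====

theorem pv_dict_keep (pa : List Int) (ax : Int) (hax : ax ∉ pa) (d : PySem.Dict Int (List Int)) :
    (pa.foldl (fun d a => d.insert a [-1, 0, 1]) d).getD ax [] = d.getD ax [] := by
  induction pa generalizing d with
  | nil => rfl
  | cons a pa ih =>
    simp only [List.mem_cons, not_or] at hax
    rw [List.foldl_cons, ih hax.2, PySem.Dict.getD_insert_of_ne _ _ _ hax.1]

theorem pv_dict_getD (pa : List Int) (ax : Int) (hax : ax ∈ pa) (d : PySem.Dict Int (List Int)) :
    (pa.foldl (fun d a => d.insert a [-1, 0, 1]) d).getD ax [] = [-1, 0, 1] := by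
  induction pa generalizing d with
  | nil => exact absurd hax (List.not_mem_nil)
  | cons a pa ih =>
    rw [List.foldl_cons]
    by_cases h : ax ∈ pa
    · exact ih h _
    · have hax' : ax = a := by
        rcases List.mem_cons.mp hax with h1 | h2
        · exact h1
        · exact absurd h2 h
      subst hax'
      rw [pv_dict_keep pa ax h, PySem.Dict.getD_insert_self _ _ _ _]

-- A's skip-or-append loop as filter + map
theorem pv_foldl_skip_if {α β : Type} (l : List α) (p : α → Bool) (f : α → β) (acc : List β) :
    l.foldl (fun dirs x => if p x then dirs else dirs ++ [f x]) acc
      = acc ++ (l.filter (fun x => !p x)).map f := by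
  induction l generalizing acc with
  | nil => simp
  | cons x l ih =>
    rw [List.foldl_cons, ih]
    cases h : p x <;> simp [h]

-- B's recursion computed as filter + map over the product of replicated pools
theorem pvRecB_eq (axes : List Int) (d : List Int) (nz : Bool) :
    pvRecB axes d nz
      = ((pvProd (List.replicate axes.length [-1, 0, 1])).filter
          (fun t => nz || !(t.all (fun c => c == 0)))).map
          (fun t => (axes.zip t).foldl (fun d p => PySem.List.pySetD d p.1 p.2) d) := by
  induction axes generalizing d nz with
  | nil =>
    cases nz <;> simp [pvRecB, pvProd]
  | cons ax rest ih =>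
    show ([-1, 0, 1] : List Int).foldl
        (fun out c => out ++ pvRecB rest (PySem.List.pySetD d ax c) (nz || c != 0)) [] = _
    rw [PySem.List.foldl_append_eq_flatMap, List.nil_append]
    rw [List.length_cons, List.replicate_succ]
    show _ = ((([-1, 0, 1] : List Int).flatMap
        (fun x => (pvProd (List.replicate rest.length [-1, 0, 1])).map (fun r => x :: r))).filter _).map _
    rw [List.filter_flatMap, List.map_flatMap]
    apply List.flatMap_congr
    intro c _
    rw [ih, List.filter_map, List.map_map]
    congr 1
    apply List.filter_congr
    intro t _
    simp only [Function.comp_apply, List.all_cons]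
    cases h : (c == 0) <;> cases nz <;> simp_all [bne]

-- ===== VERDICT (by name: the statement is the Claim_ definition above) =====
theorem shift_directions_py_spec : Claim_equal_shift_directions_py := by
  intro pa dim _ _
  unfold Spec_shift_directions_py shift_directions_py shift_directions_py_alt
  dsimp only
  have hpools : pa.map (fun ax =>
      (pa.foldl (fun d a => d.insert a [-1, 0, 1]) PySem.Dict.empty).getD ax [])
      = List.replicate pa.length [-1, 0, 1] := by
    rw [List.map_congr_left (fun ax h => pv_dict_getD pa ax h _)]
    exact List.map_const'
  rw [hpools, pv_foldl_skip_if, pvRecB_eq, List.nil_append]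
  simp
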